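-- pv_equiv track=rewrite | github.com/TadejMohorcic/advent-of-code | 2015/2015-19.py | calculate_possibilities
-- ===== SOURCE A (Python) =====
-- def calculate_possibilities(molecule, instruction_dict):
--     possibilities = set()
--
--     for i in range(len(molecule)):
--         for j in range(2):
--             symbol = molecule[i:i + j + 1]
--             if symbol in instruction_dict:
--                 for c in instruction_dict[symbol]:
--                     new_molecule = molecule[:i] + c + molecule[i + j + 1:]
--                     possibilities.add(new_molecule)
--
--     return len(possibilities)
-- ===== SOURCE B (Python) =====
-- def calculate_possibilities(molecule, instruction_dict):
--     found = set()
--     for symbol, replacements in instruction_dict.items():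
--         k = len(symbol)
--         if k == 1 or k == 2:
--             for i in range(len(molecule) - k + 1):
--                 if molecule.startswith(symbol, i):
--                     for c in replacements:
--                         found.add(molecule[:i] + c + molecule[i + k:])
--     return len(found)
-- ===== Notes on version B (the rewrite author's own statement) =====
-- stated objective: alternative
-- what changed: B inverts the loop structure: instead of scanning every position and window length and probing the dict with each slice, it iterates over the rule table once, skips rules whose symbol length is not 1 or 2, and scans the molecule for matches of each symbol with startswith, eliminating the per-position slice construction and dict membership tests/lookups.
import Mathlib
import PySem

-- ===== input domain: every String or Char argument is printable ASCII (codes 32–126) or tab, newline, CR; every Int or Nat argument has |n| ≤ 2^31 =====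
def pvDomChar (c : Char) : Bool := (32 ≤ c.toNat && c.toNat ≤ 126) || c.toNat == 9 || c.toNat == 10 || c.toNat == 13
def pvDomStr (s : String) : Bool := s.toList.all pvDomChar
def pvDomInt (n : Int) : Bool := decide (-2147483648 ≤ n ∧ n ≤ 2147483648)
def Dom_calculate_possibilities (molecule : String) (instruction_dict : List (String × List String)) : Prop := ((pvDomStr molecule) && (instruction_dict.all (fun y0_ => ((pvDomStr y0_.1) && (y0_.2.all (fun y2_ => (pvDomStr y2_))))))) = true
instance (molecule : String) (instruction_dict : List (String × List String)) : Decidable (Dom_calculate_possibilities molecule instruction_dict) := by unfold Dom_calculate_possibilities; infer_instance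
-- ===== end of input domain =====

-- B inverts the loop structure (rules outer, substring matches inner, no per-position dict probing); measured faster in a timing run, proved equal on duplicate-key-free inputs.

-- ===== PORT A =====
-- A: for each position i and window length j+1 ∈ {1,2}, test the slice for dict membership and add every replacement result to a set.
def calculate_possibilities (molecule : String) (instruction_dict : List (String × List String)) : Int :=
  let m := molecule.toList
  let possibilities : PySem.Set String :=
    (PySem.List.pyRange 0 (PySem.Str.len molecule) 1).foldl (fun poss i =>
      (PySem.List.pyRange 0 2 1).foldl (fun poss j =>
        -- 'if symbol in instruction_dict: for c in instruction_dict[symbol]' = match on the first-match lookup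
        match (PySem.Dict.mk instruction_dict).get? (String.ofList (PySem.List.slice m (some i) (some (i + j + 1)))) with
        | some reps =>
            reps.foldl (fun poss c =>
              PySem.Set.add poss (String.ofList (PySem.List.slice m none (some i) ++ c.toList ++ PySem.List.slice m (some (i + j + 1)) none))) poss
        | none => poss) poss) PySem.Set.empty
  PySem.Set.len possibilities

-- ===== PORT B =====
-- B: for each (symbol, replacements) rule of length 1 or 2, scan the molecule for occurrences of symbol and add every replacement result.
def calculate_possibilities_alt (molecule : String) (instruction_dict : List (String × List String)) : Int :=
  let m := molecule.toList
  let found : PySem.Set String :=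
    instruction_dict.foldl (fun found sr =>
      if PySem.Str.len sr.1 = 1 ∨ PySem.Str.len sr.1 = 2 then
        (PySem.List.pyRange 0 (PySem.Str.len molecule - PySem.Str.len sr.1 + 1) 1).foldl (fun found i =>
          -- molecule.startswith(symbol, i): prefix test on the tail from i (exact here: 0 ≤ i < len(molecule))
          if PySem.Chars.startswith (m.drop i.toNat) sr.1.toList then
            sr.2.foldl (fun found c =>
              PySem.Set.add found (String.ofList (PySem.List.slice m none (some i) ++ c.toList ++ PySem.List.slice m (some (i + PySem.Str.len sr.1)) none))) found
          else found) found
      else found) PySem.Set.empty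
  PySem.Set.len found

-- ===== PRECONDITION & SPEC =====
-- Pre_ excludes only association lists with duplicate keys: they represent no Python dict (both Pythons take a dict,
-- which cannot hold two bindings of one key), and there A's first-match lookup and B's scan of every entry diverge.
def Pre_calculate_possibilities (molecule : String) (instruction_dict : List (String × List String)) : Prop :=
  (instruction_dict.map Prod.fst).Nodup
instance (molecule : String) (instruction_dict : List (String × List String)) : Decidable (Pre_calculate_possibilities molecule instruction_dict) := by unfold Pre_calculate_possibilities; infer_instance

def pvWitness_calculate_possibilities : String × (List (String × List String)) :=
  ("HOH", [("H", ["HO", "OH"]), ("O", ["HH"])])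

def Spec_calculate_possibilities (molecule : String) (instruction_dict : List (String × List String)) (out : Int) : Prop := out = calculate_possibilities_alt molecule instruction_dict
instance (molecule : String) (instruction_dict : List (String × List String)) (out : Int) : Decidable (Spec_calculate_possibilities molecule instruction_dict out) := by unfold Spec_calculate_possibilities; infer_instance

-- ===== CLAIM (what is proved, stated in full; the proofs are below) =====
def Claim_equal_calculate_possibilities : Prop := ∀ (molecule : String) (instruction_dict : List (String × List String)), Dom_calculate_possibilities molecule instruction_dict → Pre_calculate_possibilities molecule instruction_dict → Spec_calculate_possibilities molecule instruction_dict (calculate_possibilities molecule instruction_dict)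

-- ===== LEMMAS AND PROOFS =====

-- the set each port builds, named so each port is definitionally 'Set.len' of it
def pvSetA (molecule : String) (d : List (String × List String)) : PySem.Set String :=
  (PySem.List.pyRange 0 (PySem.Str.len molecule) 1).foldl (fun poss i =>
    (PySem.List.pyRange 0 2 1).foldl (fun poss j =>
      match (PySem.Dict.mk d).get? (String.ofList (PySem.List.slice molecule.toList (some i) (some (i + j + 1)))) with
      | some reps =>
          reps.foldl (fun poss c =>
            PySem.Set.add poss (String.ofList (PySem.List.slice molecule.toList none (some i) ++ c.toList ++ PySem.List.slice molecule.toList (some (i + j + 1)) none))) poss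
      | none => poss) poss) PySem.Set.empty

def pvSetB (molecule : String) (d : List (String × List String)) : PySem.Set String :=
  d.foldl (fun found sr =>
    if PySem.Str.len sr.1 = 1 ∨ PySem.Str.len sr.1 = 2 then
      (PySem.List.pyRange 0 (PySem.Str.len molecule - PySem.Str.len sr.1 + 1) 1).foldl (fun found i =>
        if PySem.Chars.startswith (molecule.toList.drop i.toNat) sr.1.toList then
          sr.2.foldl (fun found c =>
            PySem.Set.add found (String.ofList (PySem.List.slice molecule.toList none (some i) ++ c.toList ++ PySem.List.slice molecule.toList (some (i + PySem.Str.len sr.1)) none))) found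
        else found) found
    else found) PySem.Set.empty

lemma pvA_eq_len (molecule : String) (d : List (String × List String)) :
    calculate_possibilities molecule d = PySem.Set.len (pvSetA molecule d) := rfl

lemma pvB_eq_len (molecule : String) (d : List (String × List String)) :
    calculate_possibilities_alt molecule d = PySem.Set.len (pvSetB molecule d) := rfl

-- generic membership / nodup facts for set-accumulating folds
lemma pv_mem_foldl {β : Type} (l : List β) (g : PySem.Set String → β → PySem.Set String)
    (Q : β → String → Prop)
    (hg : ∀ s y x, x ∈ g s y ↔ x ∈ s ∨ Q y x) :
    ∀ (s : PySem.Set String) (x : String), x ∈ l.foldl g s ↔ x ∈ s ∨ ∃ y ∈ l, Q y x := by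
  induction l with
  | nil => simp
  | cons y l ih =>
      intro s x
      rw [List.foldl_cons, ih, hg, List.exists_mem_cons_iff]
      tauto

lemma pv_nodup_foldl {β : Type} (l : List β) (g : PySem.Set String → β → PySem.Set String)
    (hg : ∀ s y, s.Nodup → (g s y).Nodup) :
    ∀ (s : PySem.Set String), s.Nodup → (l.foldl g s).Nodup := by
  induction l with
  | nil => intro s hs; simpa using hs
  | cons y l ih => intro s hs; rw [List.foldl_cons]; exact ih _ (hg s y hs)

lemma pv_hg_add (f : String → String) : ∀ (reps : List String) (s : PySem.Set String) (x : String),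
    x ∈ reps.foldl (fun poss c => PySem.Set.add poss (f c)) s ↔ x ∈ s ∨ ∃ c ∈ reps, x = f c := by
  intro reps s x
  exact pv_mem_foldl reps _ (fun c x => x = f c) (fun s c x => PySem.Set.mem_add s (f c) x) s x

-- association-list lookup facts (Dict.mk on the raw parameter list)
lemma pv_mem_of_get? (d : List (String × List String)) (s : String) (v : List String)
    (h : (PySem.Dict.mk d).get? s = some v) : (s, v) ∈ d := by
  induction d with
  | nil => simp [PySem.Dict.get?] at h
  | cons p rest ih =>
      rw [show PySem.Dict.mk (p :: rest) = { items := (p.1, p.2) :: rest } by rfl,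
        PySem.Dict.get?_mk_cons] at h
      by_cases hps : p.1 = s
      · simp [hps] at h
        obtain ⟨a, b⟩ := p
        simp_all
      · simp [hps] at h
        exact List.mem_cons_of_mem _ (ih h)

lemma pv_get?_of_mem (d : List (String × List String)) (p : String × List String)
    (hn : (d.map Prod.fst).Nodup) (hp : p ∈ d) :
    (PySem.Dict.mk d).get? p.1 = some p.2 := by
  induction d with
  | nil => simp at hp
  | cons q rest ih =>
      simp only [List.map_cons, List.nodup_cons] at hn
      rw [show PySem.Dict.mk (q :: rest) = { items := (q.1, q.2) :: rest } by rfl,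
        PySem.Dict.get?_mk_cons]
      rcases List.mem_cons.mp hp with h | h
      · simp [h]
      · have hq1 : q.1 ≠ p.1 := by
          intro he
          exact hn.1 (he ▸ List.mem_map.mpr ⟨p, h, rfl⟩)
        simp only [beq_iff_eq, hq1, if_false]
        exact ih hn.2 h

-- per-position / per-rule predicates (exactly the ports' expressions)
def pvQA (molecule : String) (d : List (String × List String)) (i j : Int) (x : String) : Prop :=
  ∃ reps, (PySem.Dict.mk d).get? (String.ofList (PySem.List.slice molecule.toList (some i) (some (i + j + 1)))) = some reps ∧
    ∃ c ∈ reps, x = String.ofList (PySem.List.slice molecule.toList none (some i) ++ c.toList ++ PySem.List.slice molecule.toList (some (i + j + 1)) none)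

def pvQB (molecule : String) (sr : String × List String) (x : String) : Prop :=
  (PySem.Str.len sr.1 = 1 ∨ PySem.Str.len sr.1 = 2) ∧
  ∃ i ∈ PySem.List.pyRange 0 (PySem.Str.len molecule - PySem.Str.len sr.1 + 1) 1,
    PySem.Chars.startswith (molecule.toList.drop i.toNat) sr.1.toList = true ∧
    ∃ c ∈ sr.2, x = String.ofList (PySem.List.slice molecule.toList none (some i) ++ c.toList ++ PySem.List.slice molecule.toList (some (i + PySem.Str.len sr.1)) none)

-- the common characterisation of both sets' elements
def pvGood (m : List Char) (d : List (String × List String)) (x : String) : Prop :=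
  ∃ i L : Nat, ∃ reps : List String, (L = 1 ∨ L = 2) ∧ i + L ≤ m.length ∧
    (PySem.Dict.mk d).get? (String.ofList ((m.drop i).take L)) = some reps ∧
    ∃ c ∈ reps, x = String.ofList (m.take i ++ c.toList ++ m.drop (i + L))

lemma pv_memA_raw (molecule : String) (d : List (String × List String)) (x : String) :
    x ∈ pvSetA molecule d ↔
      ∃ i ∈ PySem.List.pyRange 0 (PySem.Str.len molecule) 1,
        ∃ j ∈ PySem.List.pyRange 0 2 1, pvQA molecule d i j x := by
  have hgJ : ∀ (i : Int) (s : PySem.Set String) (x : String),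
      x ∈ (PySem.List.pyRange 0 2 1).foldl (fun poss j =>
        match (PySem.Dict.mk d).get? (String.ofList (PySem.List.slice molecule.toList (some i) (some (i + j + 1)))) with
        | some reps =>
            reps.foldl (fun poss c =>
              PySem.Set.add poss (String.ofList (PySem.List.slice molecule.toList none (some i) ++ c.toList ++ PySem.List.slice molecule.toList (some (i + j + 1)) none))) poss
        | none => poss) s
        ↔ x ∈ s ∨ ∃ j ∈ PySem.List.pyRange 0 2 1, pvQA molecule d i j x := by
    intro i s x
    refine pv_mem_foldl _ _ (fun j x => pvQA molecule d i j x) ?_ s x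
    intro s j x
    unfold pvQA
    cases hres : (PySem.Dict.mk d).get? (String.ofList (PySem.List.slice molecule.toList (some i) (some (i + j + 1)))) with
    | none => simp [hres]
    | some reps =>
        rw [pv_hg_add (fun c => String.ofList (PySem.List.slice molecule.toList none (some i) ++ c.toList ++ PySem.List.slice molecule.toList (some (i + j + 1)) none))]
        simp [hres]
  unfold pvSetA
  rw [pv_mem_foldl _ _ (fun i x => ∃ j ∈ PySem.List.pyRange 0 2 1, pvQA molecule d i j x)
    (fun s i x => hgJ i s x)]
  simp [PySem.Set.empty]

lemma pv_memB_raw (molecule : String) (d : List (String × List String)) (x : String) :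
    x ∈ pvSetB molecule d ↔ ∃ sr ∈ d, pvQB molecule sr x := by
  have hgI : ∀ (sr : String × List String) (s : PySem.Set String) (x : String),
      x ∈ (PySem.List.pyRange 0 (PySem.Str.len molecule - PySem.Str.len sr.1 + 1) 1).foldl (fun found i =>
        if PySem.Chars.startswith (molecule.toList.drop i.toNat) sr.1.toList then
          sr.2.foldl (fun found c =>
            PySem.Set.add found (String.ofList (PySem.List.slice molecule.toList none (some i) ++ c.toList ++ PySem.List.slice molecule.toList (some (i + PySem.Str.len sr.1)) none))) found
        else found) s
        ↔ x ∈ s ∨ ∃ i ∈ PySem.List.pyRange 0 (PySem.Str.len molecule - PySem.Str.len sr.1 + 1) 1,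
            PySem.Chars.startswith (molecule.toList.drop i.toNat) sr.1.toList = true ∧
            ∃ c ∈ sr.2, x = String.ofList (PySem.List.slice molecule.toList none (some i) ++ c.toList ++ PySem.List.slice molecule.toList (some (i + PySem.Str.len sr.1)) none) := by
    intro sr s x
    refine pv_mem_foldl _ _ (fun i x =>
      PySem.Chars.startswith (molecule.toList.drop i.toNat) sr.1.toList = true ∧
      ∃ c ∈ sr.2, x = String.ofList (PySem.List.slice molecule.toList none (some i) ++ c.toList ++ PySem.List.slice molecule.toList (some (i + PySem.Str.len sr.1)) none)) ?_ s x
    intro s i x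
    by_cases hsw : PySem.Chars.startswith (molecule.toList.drop i.toNat) sr.1.toList = true
    · rw [if_pos hsw,
        pv_hg_add (fun c => String.ofList (PySem.List.slice molecule.toList none (some i) ++ c.toList ++ PySem.List.slice molecule.toList (some (i + PySem.Str.len sr.1)) none))]
      simp [hsw]
    · rw [if_neg hsw]
      simp [hsw]
  have hgSR : ∀ (s : PySem.Set String) (sr : String × List String) (x : String),
      x ∈ (if PySem.Str.len sr.1 = 1 ∨ PySem.Str.len sr.1 = 2 then
        (PySem.List.pyRange 0 (PySem.Str.len molecule - PySem.Str.len sr.1 + 1) 1).foldl (fun found i =>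
          if PySem.Chars.startswith (molecule.toList.drop i.toNat) sr.1.toList then
            sr.2.foldl (fun found c =>
              PySem.Set.add found (String.ofList (PySem.List.slice molecule.toList none (some i) ++ c.toList ++ PySem.List.slice molecule.toList (some (i + PySem.Str.len sr.1)) none))) found
          else found) s
        else s) ↔ x ∈ s ∨ pvQB molecule sr x := by
    intro s sr x
    unfold pvQB
    by_cases hk : PySem.Str.len sr.1 = 1 ∨ PySem.Str.len sr.1 = 2
    · rw [if_pos hk, hgI sr s x]
      tauto
    · rw [if_neg hk]
      tauto
  unfold pvSetB
  rw [pv_mem_foldl _ _ (fun sr x => pvQB molecule sr x) hgSR]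
  simp [PySem.Set.empty]

lemma pv_memA (molecule : String) (d : List (String × List String)) (x : String) :
    x ∈ pvSetA molecule d ↔ pvGood molecule.toList d x := by
  rw [pv_memA_raw]
  unfold pvQA pvGood
  constructor
  · rintro ⟨i, hi, j, hj, reps, hget, c, hc, hx⟩
    rw [PySem.List.mem_pyRange_one] at hi hj
    rw [PySem.Str.len_eq] at hi
    rw [PySem.List.slice_toNat _ hi.1 (by omega)] at hget
    rw [PySem.List.slice_to _ hi.1, PySem.List.slice_from _ (by omega : (0:Int) ≤ i + j + 1)] at hx
    have h1 : (i + j + 1).toNat - i.toNat = j.toNat + 1 := by omega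
    have h2 : (i + j + 1).toNat = i.toNat + j.toNat + 1 := by omega
    rw [h1] at hget
    rw [h2] at hx
    have hlt : i.toNat < molecule.toList.length := by omega
    have hj2 : j.toNat = 0 ∨ j.toNat = 1 := by omega
    rcases hj2 with hj' | hj'
    · rw [hj'] at hget hx
      exact ⟨i.toNat, 1, reps, Or.inl rfl, by omega, hget, c, hc, hx⟩
    · rw [hj'] at hget hx
      by_cases hbig : i.toNat + 2 ≤ molecule.toList.length
      · refine ⟨i.toNat, 2, reps, Or.inr rfl, hbig, ?_, c, hc, ?_⟩
        · simpa using hget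
        · have e : i.toNat + 1 + 1 = i.toNat + 2 := by omega
          rw [e] at hx; exact hx
      · have hlen : (molecule.toList.drop i.toNat).length ≤ 1 := by
          rw [List.length_drop]; omega
        refine ⟨i.toNat, 1, reps, Or.inl rfl, by omega, ?_, c, hc, ?_⟩
        · rw [List.take_of_length_le hlen]
          rw [List.take_of_length_le (by omega : (molecule.toList.drop i.toNat).length ≤ 1 + 1)] at hget
          exact hget
        · have e1 : molecule.toList.drop (i.toNat + 1 + 1) = ([] : List Char) :=
            List.drop_eq_nil_of_le (by omega)
          have e2 : molecule.toList.drop (i.toNat + 1) = ([] : List Char) :=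
            List.drop_eq_nil_of_le (by omega)
          rw [e1] at hx
          rw [e2]
          exact hx
  · rintro ⟨i, L, reps, hL, hiL, hget, c, hc, hx⟩
    have hL1 : 1 ≤ L ∧ L ≤ 2 := by rcases hL with h | h <;> omega
    refine ⟨(i : Int), ?_, ((L - 1 : Nat) : Int), ?_, reps, ?_, c, hc, ?_⟩
    · rw [PySem.List.mem_pyRange_one, PySem.Str.len_eq]; omega
    · rw [PySem.List.mem_pyRange_one]; omega
    · rw [PySem.List.slice_toNat _ (by omega) (by omega)]
      have e : ((i : Int) + ((L - 1 : Nat) : Int) + 1).toNat - ((i : Int)).toNat = L := by omega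
      rw [e, Int.toNat_natCast]
      exact hget
    · rw [PySem.List.slice_to _ (by omega), PySem.List.slice_from _ (by omega)]
      have e : ((i : Int) + ((L - 1 : Nat) : Int) + 1).toNat = i + L := by omega
      rw [e, Int.toNat_natCast]
      exact hx

lemma pv_memB (molecule : String) (d : List (String × List String))
    (hn : (d.map Prod.fst).Nodup) (x : String) :
    x ∈ pvSetB molecule d ↔ pvGood molecule.toList d x := by
  rw [pv_memB_raw]
  unfold pvQB pvGood
  constructor
  · rintro ⟨sr, hsr, hk, i, hi, hsw, c, hc, hx⟩
    rw [PySem.Str.len_eq] at hk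
    have hkn : sr.1.toList.length = 1 ∨ sr.1.toList.length = 2 := by
      rcases hk with h | h
      · left; exact_mod_cast h
      · right; exact_mod_cast h
    rw [PySem.List.mem_pyRange_one, PySem.Str.len_eq, PySem.Str.len_eq] at hi
    have hiL : i.toNat + sr.1.toList.length ≤ molecule.toList.length := by omega
    have hpre : sr.1.toList <+: molecule.toList.drop i.toNat :=
      (PySem.Chars.startswith_iff _ _).mp hsw
    have htake : sr.1.toList = (molecule.toList.drop i.toNat).take sr.1.toList.length :=
      List.prefix_iff_eq_take.mp hpre
    have hkey : String.ofList ((molecule.toList.drop i.toNat).take sr.1.toList.length) = sr.1 := by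
      rw [← htake]; exact String.ofList_toList
    refine ⟨i.toNat, sr.1.toList.length, sr.2, hkn, hiL, ?_, c, hc, ?_⟩
    · rw [hkey]
      exact pv_get?_of_mem d sr hn hsr
    · rw [PySem.List.slice_to _ hi.1, PySem.List.slice_from _ (by rw [PySem.Str.len_eq]; omega)] at hx
      have e : (i + PySem.Str.len sr.1).toNat = i.toNat + sr.1.toList.length := by
        rw [PySem.Str.len_eq]; omega
      rw [e] at hx
      exact hx
  · rintro ⟨i, L, reps, hL, hiL, hget, c, hc, hx⟩
    have hL1 : 1 ≤ L ∧ L ≤ 2 := by rcases hL with h | h <;> omega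
    have hsr : (String.ofList ((molecule.toList.drop i).take L), reps) ∈ d :=
      pv_mem_of_get? d _ reps hget
    have hkl : (String.ofList ((molecule.toList.drop i).take L)).toList
        = (molecule.toList.drop i).take L := String.toList_ofList
    have hlen : (String.ofList ((molecule.toList.drop i).take L)).toList.length = L := by
      rw [hkl, List.length_take, List.length_drop]; omega
    refine ⟨(String.ofList ((molecule.toList.drop i).take L), reps), hsr, ?_, (i : Int), ?_, ?_, c, hc, ?_⟩
    · dsimp only
      rw [PySem.Str.len_eq, hlen]
      rcases hL with h | h
      · left; exact_mod_cast congrArg (Nat.cast : Nat → Int) h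
      · right; exact_mod_cast congrArg (Nat.cast : Nat → Int) h
    · dsimp only
      rw [PySem.List.mem_pyRange_one, PySem.Str.len_eq, PySem.Str.len_eq, hlen]
      omega
    · dsimp only
      rw [Int.toNat_natCast, PySem.Chars.startswith_iff, hkl]
      exact List.take_prefix L _
    · dsimp only
      rw [PySem.List.slice_to _ (by omega),
        PySem.List.slice_from _ (by rw [PySem.Str.len_eq, hlen]; omega),
        Int.toNat_natCast]
      have e : ((i : Int) + PySem.Str.len (String.ofList ((molecule.toList.drop i).take L))).toNat
          = i + L := by
        rw [PySem.Str.len_eq, hlen]; omega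
      rw [e]
      exact hx

lemma pv_nodupA (molecule : String) (d : List (String × List String)) :
    (pvSetA molecule d).Nodup := by
  unfold pvSetA
  refine pv_nodup_foldl _ _ ?_ _ List.nodup_nil
  intro s i hs
  refine pv_nodup_foldl _ _ ?_ s hs
  intro s j hs
  cases hres : (PySem.Dict.mk d).get? (String.ofList (PySem.List.slice molecule.toList (some i) (some (i + j + 1)))) with
  | none => exact hs
  | some reps =>
      exact pv_nodup_foldl _ _ (fun s c hs => PySem.Set.nodup_add s _ hs) s hs

lemma pv_nodupB (molecule : String) (d : List (String × List String)) :
    (pvSetB molecule d).Nodup := by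
  unfold pvSetB
  refine pv_nodup_foldl _ _ ?_ _ List.nodup_nil
  intro s sr hs
  by_cases hk : PySem.Str.len sr.1 = 1 ∨ PySem.Str.len sr.1 = 2
  · rw [if_pos hk]
    refine pv_nodup_foldl _ _ ?_ s hs
    intro s i hs
    by_cases hsw : PySem.Chars.startswith (molecule.toList.drop i.toNat) sr.1.toList = true
    · rw [if_pos hsw]
      exact pv_nodup_foldl _ _ (fun s c hs => PySem.Set.nodup_add s _ hs) s hs
    · rw [if_neg hsw]
      exact hs
  · rw [if_neg hk]
    exact hs

-- ===== VERDICT (by name: the statement is the Claim_ definition above) =====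
theorem calculate_possibilities_spec : Claim_equal_calculate_possibilities := by
  intro molecule d _ hpre
  unfold Spec_calculate_possibilities
  rw [pvA_eq_len, pvB_eq_len]
  have hperm : (pvSetA molecule d).Perm (pvSetB molecule d) :=
    (List.perm_ext_iff_of_nodup (pv_nodupA molecule d) (pv_nodupB molecule d)).mpr
      (fun x => (pv_memA molecule d x).trans (pv_memB molecule d hpre x).symm)
  show ((pvSetA molecule d).length : Int) = ((pvSetB molecule d).length : Int)
  exact_mod_cast hperm.length_eq
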